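-- pv_equiv track=rewrite | github.com/enbanbunbun123/atcoder_python | 20240513_practice/ABC081A-shiftOnly.py | shift_only
-- ===== SOURCE A (Python) =====
-- def shift_only(numbers):
--     # 与えられた数列の中に奇数がある時には0を返す
--     for num in numbers:
--         if num % 2 != 0:
--             return 0
--
--     # 与えられた数列が何回和rことができるかどうかをカウントする
--     count = 0
--     while all(num % 2 == 0 for num in numbers):
--         numbers = [num // 2 for num in numbers]
--         count += 1
--
--     return count
-- ===== SOURCE B (Python) =====
-- def shift_only(numbers):
--     # OR all numbers together: the answer is the number of common trailing
--     # zero bits, i.e. the trailing zeros of the OR.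
--     acc = 0
--     for num in numbers:
--         acc |= num
--     if acc == 0:
--         return 0
--     count = 0
--     while acc % 2 == 0:
--         acc //= 2
--         count += 1
--     return count
-- ===== Notes on version B (the rewrite author's own statement) =====
-- stated objective: alternative
-- what changed: Instead of repeatedly scanning and halving the whole list while all elements are even, B ORs all numbers once and counts the trailing zero bits of the single OR value.
-- outside the precondition, e.g. on shift_only([0, 0]): A does not finish within the time limit, B returns 0
import Mathlib
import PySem

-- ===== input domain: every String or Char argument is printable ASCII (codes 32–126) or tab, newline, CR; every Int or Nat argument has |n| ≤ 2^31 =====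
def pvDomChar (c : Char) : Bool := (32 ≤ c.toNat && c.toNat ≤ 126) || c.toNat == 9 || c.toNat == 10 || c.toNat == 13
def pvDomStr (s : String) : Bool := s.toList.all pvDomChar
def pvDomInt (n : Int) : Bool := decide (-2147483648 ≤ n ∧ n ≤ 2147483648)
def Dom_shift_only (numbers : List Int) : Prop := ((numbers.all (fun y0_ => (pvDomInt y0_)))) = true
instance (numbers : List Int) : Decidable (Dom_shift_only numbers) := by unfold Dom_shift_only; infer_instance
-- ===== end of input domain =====

-- B ORs all numbers together in one pass and counts the trailing zero bits of the
-- OR, instead of A's repeated whole-list scan-and-halve passes (objective: alternative).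

-- ===== PORT A =====
-- the for loop's 'if num % 2 != 0: return 0' scan
def shiftHasOdd (numbers : List Int) : Bool :=
  numbers.any (fun num => !(PySem.Int.mod num 2 == 0))

-- 'all(num % 2 == 0 for num in numbers)'
def shiftAllEven (numbers : List Int) : Bool :=
  numbers.all (fun num => PySem.Int.mod num 2 == 0)

-- the 'while all(...): numbers = [num // 2 ...]; count += 1' loop.  The fuel
-- argument only makes the recursion total; the caller passes enough fuel for
-- every input with a nonzero element (on an all-zero list Python loops forever;
-- such inputs are excluded by Pre_).
def shiftLoopA (fuel : Nat) (numbers : List Int) (count : Int) : Int :=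
  match fuel with
  | 0 => count
  | fuel + 1 =>
    if shiftAllEven numbers then
      shiftLoopA fuel (numbers.map (fun num => PySem.Int.floordiv num 2)) (count + 1)
    else count

def shift_only (numbers : List Int) : Int :=
  if shiftHasOdd numbers then 0
  else shiftLoopA ((numbers.map Int.natAbs).sum + 1) numbers 0

-- ===== PORT B =====
-- 'while acc % 2 == 0: acc //= 2; count += 1'.  The fuel argument only makes the
-- recursion total; Source B checks acc == 0 before entering the loop, and for
-- acc ≠ 0 the loop runs fewer than |acc| + 1 times.
def shiftTzLoop (fuel : Nat) (acc : Int) (count : Int) : Int :=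
  match fuel with
  | 0 => count
  | fuel + 1 =>
    if PySem.Int.mod acc 2 == 0 then
      shiftTzLoop fuel (PySem.Int.floordiv acc 2) (count + 1)
    else count

def shift_only_alt (numbers : List Int) : Int :=
  let acc := numbers.foldl (fun a num => Int.lor a num) 0
  if acc == 0 then 0 else shiftTzLoop (acc.natAbs + 1) acc 0

-- ===== PRECONDITION & SPEC =====
-- Pre_ excludes lists whose elements are all zero (including the empty list):
-- there Python's 'while all(num % 2 == 0 ...)' loop never terminates, so A
-- returns no value at all (B returns 0).
def Pre_shift_only (numbers : List Int) : Prop := ∃ x ∈ numbers, x ≠ 0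
instance (numbers : List Int) : Decidable (Pre_shift_only numbers) := by unfold Pre_shift_only; infer_instance
def pvWitness_shift_only : List Int := [4, 6]

def Spec_shift_only (numbers : List Int) (out : Int) : Prop := out = shift_only_alt numbers
instance (numbers : List Int) (out : Int) : Decidable (Spec_shift_only numbers out) := by unfold Spec_shift_only; infer_instance

-- ===== CLAIM (what is proved, stated in full; the proofs are below) =====
def Claim_equal_shift_only : Prop := ∀ (numbers : List Int), Dom_shift_only numbers → Pre_shift_only numbers → Spec_shift_only numbers (shift_only numbers)

-- ===== LEMMAS AND PROOFS =====

lemma pv_abs_half_le (x : Int) : (PySem.Int.floordiv x 2).natAbs ≤ x.natAbs := by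
  rw [PySem.Int.floordiv_eq_ediv_of_pos (by omega : (0:Int) < 2)]
  omega

lemma pv_abs_half_lt (x : Int) (h : (2:Int) ∣ x) (h0 : x ≠ 0) :
    (PySem.Int.floordiv x 2).natAbs < x.natAbs := by
  rw [PySem.Int.floordiv_eq_ediv_of_pos (by omega : (0:Int) < 2)]
  omega

-- one halving pass strictly shrinks the measure when all elements are even
-- and some element is nonzero
lemma pv_measure_lt (numbers : List Int)
    (h1 : (numbers.all (fun num => PySem.Int.mod num 2 == 0)) = true)
    (h2 : ∃ x ∈ numbers, x ≠ 0) :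
    ((numbers.map (fun num => PySem.Int.floordiv num 2)).map Int.natAbs).sum
      < (numbers.map Int.natAbs).sum := by
  rw [List.map_map]
  apply List.sum_lt_sum
  · intro x _
    exact pv_abs_half_le x
  · obtain ⟨x, hx, hx0⟩ := h2
    refine ⟨x, hx, ?_⟩
    simp only [List.all_eq_true] at h1
    exact pv_abs_half_lt x ((PySem.Int.mod_eq_zero_iff_dvd x 2).mp (by simpa using h1 x hx)) hx0

-- 2 ∣ n is exactly bodd n = false
lemma pv_dvd_bodd (n : Int) : (2 ∣ n) ↔ n.bodd = false := by
  have h := Int.bodd_add_div2 n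
  cases hb : n.bodd <;> rw [hb] at h <;> simp at h ⊢ <;> omega

-- Python's floor division by 2 is Int.div2
lemma pv_fd2 (n : Int) : PySem.Int.floordiv n 2 = Int.div2 n := by
  have h := Int.bodd_add_div2 n
  rw [PySem.Int.floordiv_eq_ediv_of_pos (by omega : (0:Int) < 2)]
  cases hb : n.bodd <;> rw [hb] at h <;> simp at h <;> omega

-- the parity test 'n % 2 == 0' is !bodd n
lemma pv_mod2 (n : Int) : (PySem.Int.mod n 2 == 0) = !n.bodd := by
  rcases PySem.Int.mod_two_eq n with h | h
  · have hb : n.bodd = false := (pv_dvd_bodd n).mp ((PySem.Int.mod_eq_zero_iff_dvd n 2).mp h)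
    rw [h, hb]
    decide
  · have hb : n.bodd = true := by
      by_contra hb
      have h0 : PySem.Int.mod n 2 = 0 :=
        (PySem.Int.mod_eq_zero_iff_dvd n 2).mpr ((pv_dvd_bodd n).mpr (by simpa using hb))
      omega
    rw [h, hb]
    decide

lemma pv_div2_bit (b : Bool) (n : Int) : (Int.bit b n).div2 = n := by
  have h := Int.bodd_add_div2 (Int.bit b n)
  rw [Int.bodd_bit] at h
  conv_rhs at h => rw [Int.bit_val]
  cases b <;> simp at h ⊢

lemma pv_lor_bit_decomp (a b : Int) :
    Int.lor a b = Int.bit (a.bodd || b.bodd) (Int.lor a.div2 b.div2) := by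
  conv_lhs => rw [← Int.bit_decomp a, ← Int.bit_decomp b]
  rw [Int.lor_bit]

lemma pv_lor_bodd (a b : Int) : (Int.lor a b).bodd = (a.bodd || b.bodd) := by
  rw [pv_lor_bit_decomp, Int.bodd_bit]

lemma pv_lor_div2 (a b : Int) : (Int.lor a b).div2 = Int.lor a.div2 b.div2 := by
  rw [pv_lor_bit_decomp, pv_div2_bit]

lemma pv_nat_or_zero (m n : Nat) : m ||| n = 0 ↔ m = 0 ∧ n = 0 := by
  constructor
  · intro h
    have hmn : ∀ i, m.testBit i = false ∧ n.testBit i = false := by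
      intro i
      have h2 := congrArg (fun x => x.testBit i) h
      simpa [Nat.testBit_or] using h2
    constructor
    · apply Nat.eq_of_testBit_eq
      intro i
      simp [(hmn i).1]
    · apply Nat.eq_of_testBit_eq
      intro i
      simp [(hmn i).2]
  · rintro ⟨rfl, rfl⟩
    rfl

lemma pv_lor_eq_zero (a b : Int) : Int.lor a b = 0 ↔ a = 0 ∧ b = 0 := by
  cases a <;> cases b <;>
    simp [Int.lor, pv_nat_or_zero, Int.negSucc_eq] <;> omega

lemma pv_div2_ne_zero (n : Int) (h0 : n ≠ 0) (he : n.bodd = false) : Int.div2 n ≠ 0 := by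
  have h := Int.bodd_add_div2 n
  rw [he] at h
  simp at h
  intro hz
  rw [hz] at h
  simp at h
  exact h0 h.symm

lemma pv_fold_bodd (xs : List Int) (a : Int) :
    (xs.foldl (fun a num => Int.lor a num) a).bodd = (a.bodd || xs.any Int.bodd) := by
  induction xs generalizing a with
  | nil => simp
  | cons x xs ih => simp [List.foldl_cons, ih, pv_lor_bodd, Bool.or_assoc]

lemma pv_fold_zero (xs : List Int) (a : Int) :
    xs.foldl (fun a num => Int.lor a num) a = 0 ↔ a = 0 ∧ ∀ x ∈ xs, x = 0 := by
  induction xs generalizing a with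
  | nil => simp
  | cons x xs ih =>
    rw [List.foldl_cons, ih, pv_lor_eq_zero]
    constructor
    · rintro ⟨⟨ha, hx⟩, hall⟩
      refine ⟨ha, ?_⟩
      intro y hy
      rcases List.mem_cons.mp hy with rfl | hy'
      · exact hx
      · exact hall y hy'
    · rintro ⟨ha, hall⟩
      exact ⟨⟨ha, hall x List.mem_cons_self⟩,
        fun y hy => hall y (List.mem_cons_of_mem x hy)⟩

lemma pv_fold_div2 (xs : List Int) (a : Int) :
    (xs.map Int.div2).foldl (fun a num => Int.lor a num) a.div2 =
      (xs.foldl (fun a num => Int.lor a num) a).div2 := by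
  induction xs generalizing a with
  | nil => simp
  | cons x xs ih => simp only [List.map_cons, List.foldl_cons, ← pv_lor_div2, ih]

-- the simulation: A's list loop equals B's trailing-zeros loop on the OR,
-- whenever both sides carry enough fuel
lemma pv_loop_sim : ∀ (fa fb : Nat) (xs : List Int) (c : Int),
    (xs.map Int.natAbs).sum < fa →
    (xs.foldl (fun a num => Int.lor a num) 0).natAbs < fb →
    (∃ x ∈ xs, x ≠ 0) →
    shiftLoopA fa xs c = shiftTzLoop fb (xs.foldl (fun a num => Int.lor a num) 0) c := by
  intro fa
  induction fa with
  | zero => intro fb xs c hfa; omega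
  | succ fa ih =>
    intro fb xs c hfa hfb h
    match fb with
    | 0 => omega
    | fb + 1 =>
      by_cases h1 : shiftAllEven xs = true
      · have hall : ∀ x ∈ xs, x.bodd = false := by
          intro x hx
          have hx2 := (List.all_eq_true.mp h1) x hx
          rw [pv_mod2] at hx2
          simpa using hx2
        have hne : xs.foldl (fun a num => Int.lor a num) 0 ≠ 0 := by
          rw [Ne, pv_fold_zero]
          rintro ⟨-, hz⟩
          obtain ⟨x, hx, hx0⟩ := h
          exact hx0 (hz x hx)
        have hbodd : (xs.foldl (fun a num => Int.lor a num) 0).bodd = false := by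
          rw [pv_fold_bodd, show (0:Int).bodd = false from rfl, Bool.false_or]
          exact List.any_eq_false.mpr
            (fun x hx => by rw [hall x hx]; exact Bool.false_ne_true)
        have hc1 : (PySem.Int.mod (xs.foldl (fun a num => Int.lor a num) 0) 2 == 0) = true := by
          rw [pv_mod2, hbodd]
          rfl
        rw [shiftLoopA, if_pos h1, shiftTzLoop, if_pos hc1]
        have hpre' : ∃ y ∈ xs.map (fun num => PySem.Int.floordiv num 2), y ≠ 0 := by
          obtain ⟨x, hx, hx0⟩ := h
          exact ⟨PySem.Int.floordiv x 2, List.mem_map_of_mem hx,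
            by rw [pv_fd2]; exact pv_div2_ne_zero x hx0 (hall x hx)⟩
        have hmap : xs.map (fun num => PySem.Int.floordiv num 2) = xs.map Int.div2 :=
          List.map_congr_left (fun x _ => pv_fd2 x)
        have hfold : ((xs.map (fun num => PySem.Int.floordiv num 2)).foldl
              (fun a num => Int.lor a num) 0) =
            ((xs.foldl (fun a num => Int.lor a num) 0)).div2 := by
          rw [hmap, show (0 : Int) = Int.div2 0 from rfl, pv_fold_div2]
          rfl
        have hfa' : ((xs.map (fun num => PySem.Int.floordiv num 2)).map Int.natAbs).sum < fa := by
          have := pv_measure_lt xs h1 h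
          omega
        have hfb' : ((xs.map (fun num => PySem.Int.floordiv num 2)).foldl
              (fun a num => Int.lor a num) 0).natAbs < fb := by
          rw [hfold, ← pv_fd2]
          have := pv_abs_half_lt (xs.foldl (fun a num => Int.lor a num) 0)
            ((pv_dvd_bodd _).mpr hbodd) hne
          omega
        rw [ih fb _ (c + 1) hfa' hfb' hpre', hfold, pv_fd2]
      · obtain ⟨x, hx, hpx⟩ : ∃ x ∈ xs, (PySem.Int.mod x 2 == 0) = false := by
          have h1' : shiftAllEven xs = false := eq_false_of_ne_true h1
          simpa [shiftAllEven, List.all_eq_false] using h1'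
        have hbx : x.bodd = true := by
          rw [pv_mod2] at hpx
          simpa using hpx
        have hbodd : (xs.foldl (fun a num => Int.lor a num) 0).bodd = true := by
          rw [pv_fold_bodd, show (0:Int).bodd = false from rfl, Bool.false_or]
          exact List.any_eq_true.mpr ⟨x, hx, hbx⟩
        have hc1 : (PySem.Int.mod (xs.foldl (fun a num => Int.lor a num) 0) 2 == 0) = false := by
          rw [pv_mod2, hbodd]
          rfl
        rw [shiftLoopA, if_neg h1, shiftTzLoop,
          if_neg (by rw [hc1]; exact Bool.false_ne_true)]

lemma pv_A_eq_loop (xs : List Int) :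
    shift_only xs = shiftLoopA ((xs.map Int.natAbs).sum + 1) xs 0 := by
  unfold shift_only
  by_cases hodd : shiftHasOdd xs = true
  · have hne : shiftAllEven xs = false := by
      rw [shiftHasOdd] at hodd
      rw [shiftAllEven]
      obtain ⟨x, hx, hx2⟩ := List.any_eq_true.mp hodd
      exact List.all_eq_false.mpr ⟨x, hx, by simpa using hx2⟩
    rw [if_pos hodd, shiftLoopA, if_neg (by rw [hne]; exact Bool.false_ne_true)]
  · rw [if_neg hodd]

-- ===== VERDICT (by name: the statement is the Claim_ definition above) =====
theorem shift_only_spec : Claim_equal_shift_only := by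
  intro xs _ hpre
  unfold Spec_shift_only shift_only_alt
  have hz : xs.foldl (fun a num => Int.lor a num) 0 ≠ 0 := by
    rw [Ne, pv_fold_zero]
    rintro ⟨-, hall⟩
    obtain ⟨x, hx, h0⟩ := hpre
    exact h0 (hall x hx)
  simp only [beq_iff_eq, hz, if_false]
  rw [pv_A_eq_loop, pv_loop_sim ((xs.map Int.natAbs).sum + 1)
    ((xs.foldl (fun a num => Int.lor a num) 0).natAbs + 1) xs 0 (by omega) (by omega) hpre]
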